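-- pv_equiv track=rewrite | github.com/kimjune01/june.kim | worklog/sjt_cps_v2.py | brute_force_optimal
-- ===== SOURCE A (Python) =====
-- import itertools
--
-- def consecutive_sym_diffs(ordering, neighborhoods):
--     diffs = []
--     for i in range(len(ordering) - 1):
--         Ni = neighborhoods[ordering[i]]
--         Nj = neighborhoods[ordering[i+1]]
--         diffs.append(len(Ni ^ Nj))
--     return diffs
--
-- def brute_force_optimal(emitters, neighborhoods):
--     """Exact optimal for k ≤ 10."""
--     if len(emitters) > 10:
--         return None, None, None
--
--     best_max = float('inf')
--     best_ord = None
--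
--     for perm in itertools.permutations(emitters):
--         diffs = consecutive_sym_diffs(perm, neighborhoods)
--         mx = max(diffs) if diffs else 0
--         if mx < best_max:
--             best_max = mx
--             best_ord = perm
--
--     diffs = consecutive_sym_diffs(best_ord, neighborhoods) if best_ord else []
--     return best_ord, best_max, diffs
-- ===== SOURCE B (Python) =====
-- def brute_force_optimal(emitters, neighborhoods):
--     """Exact optimal for k <= 10, via lexicographic branch-and-bound DFS instead of
--     a scan of all k! permutations: a branch is abandoned as soon as the bottleneck
--     of the partial ordering already reaches the best bottleneck found so far."""
--     if len(emitters) > 10: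
--         return None, None, None
--
--     def sd(a, b):
--         return len(neighborhoods[a] ^ neighborhoods[b])
--
--     def extend(path, cur_max, pre, suffix, best):
--         # try each element of suffix as the next emitter, in left-to-right order
--         if not suffix:
--             return best
--         nxt, rest = suffix[0], suffix[1:]
--         nm = max(cur_max, sd(path[-1], nxt)) if path else cur_max
--         best = dfs(path + [nxt], nm, pre + rest, best)
--         return extend(path, cur_max, pre + [nxt], rest, best)
--
--     def dfs(path, cur_max, remaining, best):
--         if best is not None and best[0] <= cur_max:
--             return best  # prune: every completion has bottleneck >= cur_max
--         if not remaining: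
--             return (cur_max, path)
--         return extend(path, cur_max, [], remaining, best)
--
--     bmax, bord = dfs([], 0, list(emitters), None)
--     bord = tuple(bord)
--     return bord, bmax, [sd(x, y) for x, y in zip(bord, bord[1:])]
-- ===== Notes on version B (the rewrite author's own statement) =====
-- stated objective: alternative
-- what changed: B replaces A's linear scan of the full itertools.permutations stream by a lexicographic branch-and-bound DFS over partial orderings that abandons a branch as soon as its partial bottleneck already reaches the best bottleneck found, returning the same lexicographically-first optimal ordering.
import Mathlib
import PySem

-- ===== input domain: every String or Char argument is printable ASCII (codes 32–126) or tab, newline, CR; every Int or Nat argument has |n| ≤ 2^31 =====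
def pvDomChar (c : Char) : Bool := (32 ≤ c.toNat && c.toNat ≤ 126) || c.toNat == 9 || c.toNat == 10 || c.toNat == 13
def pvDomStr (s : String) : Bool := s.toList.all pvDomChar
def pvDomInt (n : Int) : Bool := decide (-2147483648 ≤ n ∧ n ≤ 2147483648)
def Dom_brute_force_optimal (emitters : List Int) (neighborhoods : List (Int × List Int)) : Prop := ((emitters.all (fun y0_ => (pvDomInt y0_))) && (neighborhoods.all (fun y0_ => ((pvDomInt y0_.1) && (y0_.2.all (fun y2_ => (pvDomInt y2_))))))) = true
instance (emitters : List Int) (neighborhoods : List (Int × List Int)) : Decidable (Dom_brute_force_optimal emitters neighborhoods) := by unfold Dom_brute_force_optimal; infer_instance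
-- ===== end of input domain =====

-- B replaces A's scan of all k! permutations by a lexicographic branch-and-bound DFS
-- that prunes a branch once the partial bottleneck reaches the best bottleneck found;
-- return values proved identical on Pre_.

-- Shared primitive of both Pythons: len(neighborhoods[a] ^ neighborhoods[b]).
-- neighborhoods[x] (KeyError excluded by Pre_) is modelled with default [];
-- the stored values are Python sets, hence PySem.Set.ofList / symmDiff.
def pvSd (neigh : List (Int × List Int)) (a b : Int) : Int :=
  ((PySem.Set.symmDiff
      (PySem.Set.ofList (PySem.Dict.getD (PySem.Dict.ofList neigh) a []))
      (PySem.Set.ofList (PySem.Dict.getD (PySem.Dict.ofList neigh) b []))).length : Int)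

-- ===== PORT A =====
-- A's index loop 'for i in range(len(ordering)-1): diffs.append(len(N[o[i]] ^ N[o[i+1]]))',
-- ported as recursion over the same adjacent pairs, producing the same list.
def consecutive_sym_diffs (ordering : List Int) (neigh : List (Int × List Int)) : List Int :=
  match ordering with
  | a :: b :: t => pvSd neigh a b :: consecutive_sym_diffs (b :: t) neigh
  | _ => []

-- one iteration of A's 'for perm in itertools.permutations(emitters)' loop;
-- state = (best_max, best_ord), none = float('inf') / None (mx < inf is always true).
def pvAStep (neigh : List (Int × List Int)) (st : Option Int × Option (List Int))
    (perm : List Int) : Option Int × Option (List Int) :=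
  let diffs := consecutive_sym_diffs perm neigh
  let mx := (PySem.List.max? diffs (fun y => y)).getD 0   -- max(diffs) if diffs else 0
  match st.1 with
  | none => (some mx, some perm)
  | some b => if mx < b then (some mx, some perm) else st

def brute_force_optimal (emitters : List Int) (neighborhoods : List (Int × List Int)) :
    Option (List Int) × Option Int × Option (List Int) :=
  if emitters.length > 10 then (none, none, none)
  else
    let st := (PySem.List.permutations emitters emitters.length).foldl
      (pvAStep neighborhoods) (none, none)
    -- diffs = consecutive_sym_diffs(best_ord, ...) if best_ord else []  (None and () are falsy)
    let diffs2 := match st.2 with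
      | some o => if o.isEmpty then [] else consecutive_sym_diffs o neighborhoods
      | none => []
    (st.2, st.1, some diffs2)

-- ===== PORT B =====
mutual
-- Source B's dfs: prune, leaf, or try every next emitter
def pvDfs (neigh : List (Int × List Int)) (path : List Int) (curMax : Int)
    (remaining : List Int) (best : Option (Int × List Int)) : Option (Int × List Int) :=
  match best with
  | some (bm, bp) =>
    if bm ≤ curMax then some (bm, bp)   -- 'best is not None and best[0] <= cur_max'
    else
      match remaining with
      | [] => some (curMax, path)
      | x :: xs => pvExtend neigh path curMax [] (x :: xs) (some (bm, bp))
  | none =>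
    match remaining with
    | [] => some (curMax, path)
    | x :: xs => pvExtend neigh path curMax [] (x :: xs) none
termination_by (remaining.length, remaining.length + 1)
decreasing_by all_goals simp [Prod.lex_iff]

-- Source B's extend: suffix = candidates still to try at this level, pre = candidates
-- already tried (in order); remaining at this level is pre ++ suffix.
def pvExtend (neigh : List (Int × List Int)) (path : List Int) (curMax : Int)
    (pre suffix : List Int) (best : Option (Int × List Int)) : Option (Int × List Int) :=
  match suffix with
  | [] => best
  | nxt :: rest =>
    -- nm = max(cur_max, sd(path[-1], nxt)) if path else cur_max
    let nm := match path.getLast? with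
      | none => curMax
      | some l => max curMax (pvSd neigh l nxt)
    let best2 := pvDfs neigh (path ++ [nxt]) nm (pre ++ rest) best
    pvExtend neigh path curMax (pre ++ [nxt]) rest best2
termination_by (pre.length + suffix.length, suffix.length)
decreasing_by all_goals (simp [Prod.lex_iff] <;> omega)
end

def brute_force_optimal_alt (emitters : List Int) (neighborhoods : List (Int × List Int)) :
    Option (List Int) × Option Int × Option (List Int) :=
  if emitters.length > 10 then (none, none, none)
  else
    match pvDfs neighborhoods [] 0 emitters none with
    | some (bm, bord) =>
      -- [sd(x, y) for x, y in zip(bord, bord[1:])]; bord[1:] ported as drop 1 (exact)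
      (some bord, some bm,
        some ((bord.zip (bord.drop 1)).map (fun (q : Int × Int) => pvSd neighborhoods q.1 q.2)))
    | none => (none, none, none)   -- unreachable: pvDfs seeded with best = none returns some

-- ===== PRECONDITION & SPEC =====
-- Pre_ excludes exactly the KeyError inputs: some emitter is missing from the dict while
-- A (2 ≤ k ≤ 10) actually looks every emitter up; B raises there too.
def Pre_brute_force_optimal (emitters : List Int) (neighborhoods : List (Int × List Int)) : Prop :=
  (2 ≤ emitters.length ∧ emitters.length ≤ 10) →
    ∀ e ∈ emitters, e ∈ neighborhoods.map Prod.fst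
instance (emitters : List Int) (neighborhoods : List (Int × List Int)) : Decidable (Pre_brute_force_optimal emitters neighborhoods) := by unfold Pre_brute_force_optimal; infer_instance
def pvWitness_brute_force_optimal : List Int × (List (Int × List Int)) :=
  ([0, 1], [(0, [0]), (1, [1])])

def Spec_brute_force_optimal (emitters : List Int) (neighborhoods : List (Int × List Int)) (out : Option (List Int) × Option Int × Option (List Int)) : Prop := out = brute_force_optimal_alt emitters neighborhoods
instance (emitters : List Int) (neighborhoods : List (Int × List Int)) (out : Option (List Int) × Option Int × Option (List Int)) : Decidable (Spec_brute_force_optimal emitters neighborhoods out) := by unfold Spec_brute_force_optimal; infer_instance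

-- ===== CLAIM (what is proved, stated in full; the proofs are below) =====
def Claim_equal_brute_force_optimal : Prop := ∀ (emitters : List Int) (neighborhoods : List (Int × List Int)), Dom_brute_force_optimal emitters neighborhoods → Pre_brute_force_optimal emitters neighborhoods → Spec_brute_force_optimal emitters neighborhoods (brute_force_optimal emitters neighborhoods)

-- ===== LEMMAS AND PROOFS =====

-- proof-side: the selection step shared by both programs ('keep the strictly better candidate')
def pvUpd (b : Option (Int × List Int)) (m : Int) (p : List Int) : Option (Int × List Int) :=
  match b with
  | none => some (m, p)
  | some (bm, bp) => if m < bm then some (m, p) else some (bm, bp)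

-- proof-side: running bottleneck of extending a path whose last element is l by c, from m
def pvMseq (neigh : List (Int × List Int)) (l : Option Int) (c : List Int) (m : Int) : Int :=
  match l, c with
  | _, [] => m
  | none, x :: t => pvMseq neigh (some x) t m
  | some a, x :: t => pvMseq neigh (some x) t (max m (pvSd neigh a x))

-- proof-side: the permutations pvExtend enumerates, by first chosen element
def pvPermsFrom (pre suffix : List Int) : List (List Int) :=
  match suffix with
  | [] => []
  | x :: rest =>
    ((PySem.List.permutations (pre ++ rest) (pre ++ rest).length).map (fun p => x :: p)) ++
      pvPermsFrom (pre ++ [x]) rest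

def pvBlock (xs : List Int) (r : Nat) (i : Nat) : List (List Int) :=
  match xs[i]? with
  | none => []
  | some y => (PySem.List.permutations (xs.eraseIdx i) r).map (fun p => y :: p)

theorem pvPermutations_succ (xs : List Int) (r : Nat) :
    PySem.List.permutations xs (r+1) = (List.range xs.length).flatMap (pvBlock xs r) := by
  rw [PySem.List.permutations]
  congr 1
  funext i
  simp only [pvBlock]
  cases xs[i]? <;> rfl

theorem pvEraseIdx_middle (pre rest : List Int) (x : Int) :
    (pre ++ x :: rest).eraseIdx pre.length = pre ++ rest := by
  induction pre with
  | nil => rfl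
  | cons a t ih => simpa using ih

theorem pvMseq_nil (neigh : List (Int × List Int)) (l : Option Int) (m : Int) :
    pvMseq neigh l [] m = m := by
  cases l <;> rfl

theorem pvMseq_cons (neigh : List (Int × List Int)) (path : List Int) (nxt : Int)
    (c : List Int) (m : Int) :
    pvMseq neigh path.getLast? (nxt :: c) m =
      pvMseq neigh (some nxt) c
        (match path.getLast? with
          | none => m
          | some l => max m (pvSd neigh l nxt)) := by
  cases path.getLast? <;> rfl

theorem pvPermsFrom_eq (suffix : List Int) : ∀ (pre : List Int),
    (List.range' pre.length suffix.length).flatMap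
        (pvBlock (pre ++ suffix) (pre.length + suffix.length - 1)) =
      pvPermsFrom pre suffix := by
  induction suffix with
  | nil => intro pre; rfl
  | cons x rest ih =>
    intro pre
    rw [show (x :: rest).length = rest.length + 1 from rfl, List.range'_succ,
      List.flatMap_cons, pvPermsFrom]
    have hb : pvBlock (pre ++ x :: rest) (pre.length + (rest.length + 1) - 1) pre.length =
        (PySem.List.permutations (pre ++ rest) (pre ++ rest).length).map (fun p => x :: p) := by
      have hr : pre.length + (rest.length + 1) - 1 = (pre ++ rest).length := by
        simp [List.length_append]
      rw [hr]
      simp [pvBlock, pvEraseIdx_middle]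
    have ht : (List.range' (pre.length + 1) rest.length).flatMap
        (pvBlock (pre ++ x :: rest) (pre.length + (rest.length + 1) - 1)) =
        pvPermsFrom (pre ++ [x]) rest := by
      have h1 : pre ++ x :: rest = (pre ++ [x]) ++ rest := by simp
      have h2 : pre.length + 1 = (pre ++ [x]).length := by simp
      have h3 : pre.length + (rest.length + 1) - 1 = (pre ++ [x]).length + rest.length - 1 := by
        simp
      rw [h1, h2, h3, ih]
    rw [hb, ht]

theorem pvPermutations_eq_permsFrom (x : Int) (rest : List Int) :
    PySem.List.permutations (x :: rest) (x :: rest).length = pvPermsFrom [] (x :: rest) := by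
  rw [show (x :: rest).length = rest.length + 1 from rfl, pvPermutations_succ,
    List.range_eq_range']
  simpa using pvPermsFrom_eq (x :: rest) []

theorem pvMseq_ge (neigh : List (Int × List Int)) (c : List Int) :
    ∀ (l : Option Int) (m : Int), m ≤ pvMseq neigh l c m := by
  induction c with
  | nil => intro l m; simp [pvMseq_nil]
  | cons x t ih =>
    intro l m
    cases l with
    | none => simpa [pvMseq] using ih (some x) m
    | some a =>
      have h := ih (some x) (max m (pvSd neigh a x))
      simp only [pvMseq]
      exact le_trans (le_max_left _ _) h

theorem pvFoldl_upd_fixed (g : List Int → Int) (h : List Int → List Int)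
    (L : List (List Int)) (bm : Int) (bp : List Int) (hge : ∀ c ∈ L, bm ≤ g c) :
    L.foldl (fun b c => pvUpd b (g c) (h c)) (some (bm, bp)) = some (bm, bp) := by
  induction L with
  | nil => rfl
  | cons c t ih =>
    have h1 : pvUpd (some (bm, bp)) (g c) (h c) = some (bm, bp) := by
      simp only [pvUpd]
      rw [if_neg (not_lt.2 (hge c (List.mem_cons_self)))]
    rw [List.foldl_cons, h1]
    exact ih (fun c hc => hge c (List.mem_cons_of_mem _ hc))

theorem pvDfs_spec (neigh : List (Int × List Int)) : ∀ (n : Nat) (remaining : List Int),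
    remaining.length = n → ∀ (path : List Int) (curMax : Int) (best : Option (Int × List Int)),
    pvDfs neigh path curMax remaining best =
      (PySem.List.permutations remaining remaining.length).foldl
        (fun b c => pvUpd b (pvMseq neigh path.getLast? c curMax) (path ++ c)) best := by
  intro n
  induction n using Nat.strong_induction_on with
  | _ n ih =>
  intro remaining hlen path curMax best
  have hext : ∀ (suffix pre : List Int) (b' : Option (Int × List Int)),
      pre.length + suffix.length = n →
      pvExtend neigh path curMax pre suffix b' =
        (pvPermsFrom pre suffix).foldl
          (fun b c => pvUpd b (pvMseq neigh path.getLast? c curMax) (path ++ c)) b' := by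
    intro suffix
    induction suffix with
    | nil => intro pre b' _; rw [pvExtend]; rfl
    | cons nxt rest ihs =>
      intro pre b' hlen'
      rw [pvExtend]
      have hn1 : (pre ++ rest).length < n := by simp [List.length_append] at *; omega
      have hdfs := ih (pre ++ rest).length hn1 (pre ++ rest) rfl (path ++ [nxt])
        (match path.getLast? with
          | none => curMax
          | some l => max curMax (pvSd neigh l nxt)) b'
      rw [hdfs, ihs (pre ++ [nxt]) _ (by simp at *; omega)]
      rw [pvPermsFrom, List.foldl_append, List.foldl_map]
      congr 1
      apply PySem.List.foldl_congr_mem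
      intro b c _
      rw [List.getLast?_concat, pvMseq_cons]
      congr 1
      simp
  cases best with
  | none =>
    cases remaining with
    | nil =>
      rw [pvDfs.eq_def]
      show some (curMax, path) =
        List.foldl _ none (PySem.List.permutations ([] : List Int) 0)
      rw [show PySem.List.permutations ([] : List Int) 0 = [[]] from rfl]
      simp [pvUpd, pvMseq_nil]
    | cons x xs =>
      rw [pvDfs.eq_def]
      show pvExtend neigh path curMax [] (x :: xs) none = _
      rw [hext (x :: xs) [] none (by simpa using hlen), pvPermutations_eq_permsFrom]
  | some pr =>
    obtain ⟨bm, bp⟩ := pr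
    by_cases hg : bm ≤ curMax
    · rw [pvDfs.eq_def]
      simp only [if_pos hg]
      exact (pvFoldl_upd_fixed _ _ _ _ _ (fun c _ =>
        le_trans hg (pvMseq_ge neigh c path.getLast? curMax))).symm
    · cases remaining with
      | nil =>
        rw [pvDfs.eq_def]
        simp only [if_neg hg]
        show some (curMax, path) =
          List.foldl _ (some (bm, bp)) (PySem.List.permutations ([] : List Int) 0)
        rw [show PySem.List.permutations ([] : List Int) 0 = [[]] from rfl]
        simp [pvUpd, pvMseq_nil, if_pos (lt_of_not_ge hg)]
      | cons x xs =>
        rw [pvDfs.eq_def]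
        simp only [if_neg hg]
        show pvExtend neigh path curMax [] (x :: xs) (some (bm, bp)) = _
        rw [hext (x :: xs) [] (some (bm, bp)) (by simpa using hlen),
          pvPermutations_eq_permsFrom]

theorem pvSd_nonneg (neigh : List (Int × List Int)) (a b : Int) : 0 ≤ pvSd neigh a b :=
  Int.natCast_nonneg _

theorem pvMseq_eq_foldl (neigh : List (Int × List Int)) (c : List Int) :
    ∀ (a : Int) (m : Int),
    pvMseq neigh (some a) c m = (consecutive_sym_diffs (a :: c) neigh).foldl max m := by
  induction c with
  | nil => intro a m; rfl
  | cons x t ih =>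
    intro a m
    simp only [pvMseq, consecutive_sym_diffs, List.foldl_cons]
    exact ih x (max m (pvSd neigh a x))

theorem pvCsd_eq_zip (neigh : List (Int × List Int)) : ∀ (l : List Int),
    consecutive_sym_diffs l neigh =
      (l.zip (l.drop 1)).map (fun (q : Int × Int) => pvSd neigh q.1 q.2) := by
  intro l
  induction l with
  | nil => rfl
  | cons a t ih =>
    cases t with
    | nil => rfl
    | cons b u => simp [consecutive_sym_diffs, ih]

theorem pvMx_eq (neigh : List (Int × List Int)) (c : List Int) :
    pvMseq neigh none c 0 =
      (PySem.List.max? (consecutive_sym_diffs c neigh) (fun y => y)).getD 0 := by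
  cases c with
  | nil => rfl
  | cons a t =>
    have h1 : pvMseq neigh none (a :: t) 0 = (consecutive_sym_diffs (a :: t) neigh).foldl max 0 := by
      simp only [pvMseq]
      exact pvMseq_eq_foldl neigh t a 0
    rw [h1]
    cases h : consecutive_sym_diffs (a :: t) neigh with
    | nil => rfl
    | cons x L =>
      have hx : 0 ≤ x := by
        have hmem : x ∈ consecutive_sym_diffs (a :: t) neigh := by rw [h]; exact List.mem_cons_self
        rw [pvCsd_eq_zip] at hmem
        obtain ⟨q, _, hq⟩ := List.mem_map.mp hmem
        rw [← hq]; exact pvSd_nonneg neigh q.1 q.2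
      rw [PySem.List.max?_id_cons]
      simp [max_eq_right hx]

def pvConv : Option (Int × List Int) → Option Int × Option (List Int)
  | none => (none, none)
  | some (m, p) => (some m, some p)

theorem pvA_fold (neigh : List (Int × List Int)) (L : List (List Int)) :
    ∀ (b : Option (Int × List Int)),
    L.foldl (pvAStep neigh) (pvConv b) =
      pvConv (L.foldl (fun b c => pvUpd b (pvMseq neigh none c 0) c) b) := by
  induction L with
  | nil => intro b; rfl
  | cons c t ih =>
    intro b
    have hstep : pvAStep neigh (pvConv b) c = pvConv (pvUpd b (pvMseq neigh none c 0) c) := by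
      cases b with
      | none => simp [pvAStep, pvUpd, pvConv, pvMx_eq]
      | some pr =>
        obtain ⟨bm, bp⟩ := pr
        simp only [pvAStep, pvUpd, pvConv, pvMx_eq]
        split <;> rfl
    rw [List.foldl_cons, List.foldl_cons, hstep, ih]

theorem pvPerms_ne_nil : ∀ (n : Nat) (xs : List Int), xs.length = n →
    PySem.List.permutations xs n ≠ [] := by
  intro n
  induction n with
  | zero => intro xs _; rw [show PySem.List.permutations xs 0 = [[]] from rfl]; simp
  | succ r ih =>
    intro xs h
    cases xs with
    | nil => simp at h
    | cons y t =>
      rw [pvPermutations_succ, show (y :: t).length = t.length + 1 from rfl,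
        List.range_succ_eq_map]
      intro hcon
      rw [List.flatMap_cons] at hcon
      obtain ⟨h1, _⟩ := List.append_eq_nil_iff.mp hcon
      have : PySem.List.permutations t r = [] := by
        simpa [pvBlock] using h1
      exact ih t (by simpa using h) this

theorem pvUpd_isSome (b : Option (Int × List Int)) (m : Int) (p : List Int) :
    (pvUpd b m p).isSome := by
  cases b with
  | none => rfl
  | some pr => obtain ⟨bm, bp⟩ := pr; simp only [pvUpd]; split <;> rfl

theorem pvFoldl_upd_isSome (g : List Int → Int) (h : List Int → List Int)
    (L : List (List Int)) (b : Option (Int × List Int)) (hb : b.isSome) :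
    (L.foldl (fun b c => pvUpd b (g c) (h c)) b).isSome := by
  induction L generalizing b with
  | nil => exact hb
  | cons c t ih => exact ih _ (pvUpd_isSome b (g c) (h c))

-- ===== VERDICT (by name: the statement is the Claim_ definition above) =====
theorem brute_force_optimal_spec : Claim_equal_brute_force_optimal := by
  intro emitters neighborhoods _ _
  unfold Spec_brute_force_optimal brute_force_optimal brute_force_optimal_alt
  by_cases h10 : emitters.length > 10
  · rw [if_pos h10, if_pos h10]
  · rw [if_neg h10, if_neg h10]
    have hdfs := pvDfs_spec neighborhoods emitters.length emitters rfl [] 0 none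
    have hR : (pvDfs neighborhoods [] 0 emitters none).isSome := by
      rw [hdfs]
      cases hP : PySem.List.permutations emitters emitters.length with
      | nil => exact absurd hP (pvPerms_ne_nil emitters.length emitters rfl)
      | cons c L =>
        rw [List.foldl_cons]
        exact pvFoldl_upd_isSome _ _ L _ (pvUpd_isSome none _ _)
    obtain ⟨⟨m, p⟩, hRv⟩ := Option.isSome_iff_exists.mp hR
    have hA : (PySem.List.permutations emitters emitters.length).foldl
        (pvAStep neighborhoods) (none, none) = (some m, some p) := by
      have h0 := pvA_fold neighborhoods (PySem.List.permutations emitters emitters.length) none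
      have h1 : (PySem.List.permutations emitters emitters.length).foldl
          (fun b c => pvUpd b (pvMseq neighborhoods none c 0) c) none = some (m, p) := by
        rw [← hRv, hdfs]; rfl
      rw [show ((none, none) : Option Int × Option (List Int)) = pvConv none from rfl,
        h0, h1]
      rfl
    rw [hRv, hA]
    simp only []
    have hdiffs : (if p.isEmpty then [] else consecutive_sym_diffs p neighborhoods) =
        (p.zip (p.drop 1)).map (fun (q : Int × Int) => pvSd neighborhoods q.1 q.2) := by
      rw [← pvCsd_eq_zip]
      cases p <;> rfl
    rw [hdiffs]
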